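-- pv_equiv track=rewrite | github.com/andgineer/dinary | tasks.py | _extract_format_flags
-- ===== SOURCE A (Python) =====
-- def _extract_format_flags(flags: list[str]) -> tuple[bool, bool, list[str]]:
--     """Split ``flags`` into ``(as_csv, as_json, remaining)``.
--
--     ``--csv`` / ``--json`` select the local output format and are
--     consumed here. Filters (``--year``, ``--month``, ...) stay in
--     ``remaining`` and travel through to the remote report module
--     (they affect which rows come back). The remote always runs in
--     JSON mode; ``--csv`` / ``--json`` never reach it.
--     """
--     as_csv = False
--     as_json = False
--     remaining: list[str] = []
--     for flag in flags:
--         if flag == "--csv":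
--             as_csv = True
--         elif flag == "--json":
--             as_json = True
--         else:
--             remaining.append(flag)
--     return as_csv, as_json, remaining
-- ===== SOURCE B (Python) =====
-- def _extract_format_flags(flags: list[str]) -> tuple[bool, bool, list[str]]:
--     """Split ``flags`` into ``(as_csv, as_json, remaining)`` via three passes."""
--     as_csv = "--csv" in flags
--     as_json = "--json" in flags
--     remaining = [f for f in flags if f not in ("--csv", "--json")]
--     return as_csv, as_json, remaining
-- ===== Notes on version B (the rewrite author's own statement) =====
-- stated objective: idiomatic
-- what changed: Replaced the single fused accumulator loop with three independent passes: two membership tests for --csv/--json and one filter comprehension for the remaining flags.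
import Mathlib
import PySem

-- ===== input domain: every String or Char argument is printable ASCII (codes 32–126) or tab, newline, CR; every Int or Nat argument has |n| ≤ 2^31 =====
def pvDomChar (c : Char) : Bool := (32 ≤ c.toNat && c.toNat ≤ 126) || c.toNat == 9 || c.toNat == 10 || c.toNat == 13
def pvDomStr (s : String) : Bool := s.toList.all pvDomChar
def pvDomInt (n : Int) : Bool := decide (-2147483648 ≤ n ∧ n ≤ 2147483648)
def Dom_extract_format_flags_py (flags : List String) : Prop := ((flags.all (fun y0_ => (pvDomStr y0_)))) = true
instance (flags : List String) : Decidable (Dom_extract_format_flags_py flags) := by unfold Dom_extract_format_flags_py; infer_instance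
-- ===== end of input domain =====

-- B replaces A's single fused loop by three independent passes (two membership tests and a filter); same result, more idiomatic.

-- ===== PORT A =====
-- A: one fold carrying (as_csv, as_json, remaining) with remaining appended at the back.
def extract_format_flags_py (flags : List String) : Bool × Bool × List String :=
  flags.foldl
    (fun st flag =>
      if flag = "--csv" then (true, st.2.1, st.2.2)
      else if flag = "--json" then (st.1, true, st.2.2)
      else (st.1, st.2.1, st.2.2 ++ [flag]))
    (false, false, [])

-- ===== PORT B =====
-- B: three independent passes.
def extract_format_flags_py_alt (flags : List String) : Bool × Bool × List String :=
  (flags.contains "--csv", flags.contains "--json",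
   flags.filter (fun f => ¬ (f = "--csv" ∨ f = "--json")))

-- ===== PRECONDITION & SPEC =====
def Spec_extract_format_flags_py (flags : List String) (out : Bool × Bool × List String) : Prop := out = extract_format_flags_py_alt flags
instance (flags : List String) (out : Bool × Bool × List String) : Decidable (Spec_extract_format_flags_py flags out) := by unfold Spec_extract_format_flags_py; infer_instance

-- ===== CLAIM (what is proved, stated in full; the proofs are below) =====
def Claim_equal_extract_format_flags_py : Prop := ∀ (flags : List String), Dom_extract_format_flags_py flags → Spec_extract_format_flags_py flags (extract_format_flags_py flags)

-- ===== LEMMAS AND PROOFS =====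
-- loop invariant: folding from an arbitrary state combines with B's three passes
theorem extract_fold_inv (flags : List String) (c j : Bool) (r : List String) :
    flags.foldl
      (fun st flag =>
        if flag = "--csv" then (true, st.2.1, st.2.2)
        else if flag = "--json" then (st.1, true, st.2.2)
        else (st.1, st.2.1, st.2.2 ++ [flag]))
      (c, j, r)
    = (c || flags.contains "--csv", j || flags.contains "--json",
       r ++ flags.filter (fun f => ¬ (f = "--csv" ∨ f = "--json"))) := by
  induction flags generalizing c j r with
  | nil => simp
  | cons x xs ih =>
    by_cases hc : x = "--csv"
    · simp [hc, List.foldl_cons, ih]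
    · by_cases hj : x = "--json"
      · simp [hj, List.foldl_cons, ih]
      · simp [hc, hj, Ne.symm hc, Ne.symm hj, List.foldl_cons, ih]

-- ===== VERDICT (by name: the statement is the Claim_ definition above) =====
theorem extract_format_flags_py_spec : Claim_equal_extract_format_flags_py := by
  intro flags _
  unfold Spec_extract_format_flags_py extract_format_flags_py extract_format_flags_py_alt
  simp [extract_fold_inv]
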